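-- pv_equiv track=rewrite | github.com/kdmtakumi/IDR-CC-webviewer | bundle_pipeline/plot_overlay_threshold_basic.py | flags_to_intervals
-- ===== SOURCE A (Python) =====
-- from typing import List, Tuple
--
-- def flags_to_intervals(flags: List[bool]) -> List[Tuple[int, int]]:
--     out: List[Tuple[int, int]] = []
--     start = None
--     for i, val in enumerate(flags, start=1):
--         if val and start is None:
--             start = i
--         if start is not None and (not val or i == len(flags)):
--             end = i if val and i == len(flags) else i - 1
--             out.append((start, end))
--             start = None
--     return out
-- ===== SOURCE B (Python) =====
-- from itertools import groupby
-- from typing import List, Tuple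
--
-- def flags_to_intervals(flags: List[bool]) -> List[Tuple[int, int]]:
--     out: List[Tuple[int, int]] = []
--     pos = 1
--     for val, grp in groupby(flags):
--         n = sum(1 for _ in grp)
--         if val:
--             out.append((pos, pos + n - 1))
--         pos += n
--     return out
-- ===== Notes on version B (the rewrite author's own statement) =====
-- stated objective: idiomatic
-- what changed: Run-length decomposition via itertools.groupby with a running position counter replaces the start=None state machine with its falling-edge and end-of-list special cases.
import Mathlib
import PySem

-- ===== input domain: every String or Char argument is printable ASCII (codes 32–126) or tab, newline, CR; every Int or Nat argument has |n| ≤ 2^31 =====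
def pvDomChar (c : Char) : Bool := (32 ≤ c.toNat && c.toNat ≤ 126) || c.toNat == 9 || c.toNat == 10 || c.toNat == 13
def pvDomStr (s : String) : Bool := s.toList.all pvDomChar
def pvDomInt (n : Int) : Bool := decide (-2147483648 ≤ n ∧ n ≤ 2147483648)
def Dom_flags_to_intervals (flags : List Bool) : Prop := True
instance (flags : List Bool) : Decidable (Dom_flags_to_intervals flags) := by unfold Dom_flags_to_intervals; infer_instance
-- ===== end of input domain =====

-- B replaces A's start=None state machine by an itertools.groupby run-length
-- decomposition (same O(n) cost, plainer control flow); return values are proved equal.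

-- ===== PORT A =====
-- enumerate(flags, start=1)
def pvEnum (i : Int) : List Bool → List (Int × Bool)
  | [] => []
  | v :: r => (i, v) :: pvEnum (i + 1) r

-- the for-loop of A: state = (out, start)
def pvALoop (n : Int) : List (Int × Bool) → List (Int × Int) → Option Int → List (Int × Int)
  | [], out, _ => out
  | (i, val) :: rest, out, start =>
    let start1 : Option Int := if val = true ∧ start = none then some i else start
    match start1 with
    | some s =>
      if val = false ∨ i = n then
        let e : Int := if val = true ∧ i = n then i else i - 1
        pvALoop n rest (out ++ [(s, e)]) none
      else
        pvALoop n rest out (some s)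
    | none => pvALoop n rest out none

def flags_to_intervals (flags : List Bool) : List (Int × Int) :=
  pvALoop (flags.length : Int) (pvEnum 1 flags) [] none

-- ===== PORT B =====
-- the groupby loop of B: each step consumes one maximal run of equal values
def pvBGo (pos : Int) : List Bool → List (Int × Int)
  | [] => []
  | v :: rest =>
    let run := rest.takeWhile (· == v)
    let len : Int := 1 + run.length
    (if v then [(pos, pos + len - 1)] else []) ++ pvBGo (pos + len) (rest.dropWhile (· == v))
termination_by l => l.length
decreasing_by
  have := List.length_dropWhile_le (· == v) rest
  simp
  omega

def flags_to_intervals_alt (flags : List Bool) : List (Int × Int) :=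
  pvBGo 1 flags

-- ===== PRECONDITION & SPEC =====
def Spec_flags_to_intervals (flags : List Bool) (out : List (Int × Int)) : Prop := out = flags_to_intervals_alt flags
instance (flags : List Bool) (out : List (Int × Int)) : Decidable (Spec_flags_to_intervals flags out) := by unfold Spec_flags_to_intervals; infer_instance

-- ===== CLAIM (what is proved, stated in full; the proofs are below) =====
def Claim_equal_flags_to_intervals : Prop := ∀ (flags : List Bool), Dom_flags_to_intervals flags → Spec_flags_to_intervals flags (flags_to_intervals flags)

-- ===== LEMMAS AND PROOFS =====

-- proof-only helper: what A's loop produces from state start = some s at position p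
def trueCont (n s p : Int) : List Bool → List (Int × Int)
  | [] => []
  | v :: r =>
    if v then (if p = n then [(s, p)] else trueCont n s (p + 1) r)
    else (s, p - 1) :: pvBGo (p + 1) r

-- proof-only helper: overwrite the start of the first interval
def replaceHead (s : Int) : List (Int × Int) → List (Int × Int)
  | [] => []
  | (_, b) :: t => (s, b) :: t

-- skipping a leading false advances the position by one
lemma pvBGo_false (p : Int) (r : List Bool) :
    pvBGo p (false :: r) = pvBGo (p + 1) r := by
  match r with
  | [] => simp [pvBGo]
  | true :: r2 => simp [pvBGo]
  | false :: r2 =>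
      simp only [pvBGo, List.takeWhile_cons, List.dropWhile_cons]
      norm_num
      all_goals ring_nf

lemma trueCont_eq (n : Int) (r : List Bool) : ∀ (q s : Int), r ≠ [] →
    q + 1 + (r.length : Int) = n + 1 →
    trueCont n s (q + 1) r = replaceHead s (pvBGo q (true :: r)) := by
  induction r with
  | nil => intro q s h; exact absurd rfl h
  | cons v r2 ih =>
    intro q s _ hlen
    match v with
    | false =>
      simp only [trueCont, pvBGo, List.takeWhile_cons, List.dropWhile_cons]
      simp [replaceHead, pvBGo_false]
    | true =>
      by_cases hq : q + 1 = n
      · have hr2 : r2 = [] := by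
          have : (r2.length : Int) = 0 := by simp at hlen; omega
          simpa using this
        subst hr2
        simp only [trueCont, if_pos hq]
        simp [pvBGo, replaceHead]
        omega
      · have hr2 : r2 ≠ [] := by
          intro h; subst h; simp at hlen; omega
        have := ih (q + 1) s hr2 (by simp at hlen ⊢; omega)
        simp [trueCont, hq]
        rw [show (q + 1 + 1 : Int) = q + 2 by ring, show (q + 2 : Int) = q + 1 + 1 by ring, this]
        simp only [pvBGo, List.takeWhile_cons, List.dropWhile_cons]
        simp [replaceHead]
        all_goals ring_nf
        all_goals simp

lemma replaceHead_pvBGo_true (p : Int) (r : List Bool) :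
    replaceHead p (pvBGo p (true :: r)) = pvBGo p (true :: r) := by
  simp [pvBGo, replaceHead]

-- main invariant: A's loop equals B's run decomposition, from either loop state
lemma main_inv (n : Int) (l : List Bool) : ∀ (p : Int) (out : List (Int × Int)),
    p + (l.length : Int) = n + 1 →
    (pvALoop n (pvEnum p l) out none = out ++ pvBGo p l)
    ∧ (∀ s, pvALoop n (pvEnum p l) out (some s) = out ++ trueCont n s p l) := by
  induction l with
  | nil => intro p out _; simp [pvEnum, pvALoop, pvBGo, trueCont]
  | cons v r ih =>
    intro p out hlen
    have hlen' : p + 1 + (r.length : Int) = n + 1 := by simp at hlen; omega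
    constructor
    · -- state none
      match v with
      | false =>
        simp only [pvEnum, pvALoop]
        norm_num
        rw [(ih (p + 1) out hlen').1, pvBGo_false]
      | true =>
        simp only [pvEnum, pvALoop]
        norm_num
        by_cases hp : p = n
        · have hr : r = [] := by
            have : (r.length : Int) = 0 := by omega
            simpa using this
          subst hr
          simp [pvEnum, pvALoop, pvBGo, hp]
        · have hr : r ≠ [] := by
            intro h; subst h; simp at hlen'; omega
          simp only [if_neg hp]
          rw [(ih (p + 1) out hlen').2 p, trueCont_eq n r p p hr hlen',
            replaceHead_pvBGo_true]
    · -- state some s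
      intro s
      match v with
      | false =>
        simp only [pvEnum, pvALoop]
        norm_num
        rw [(ih (p + 1) (out ++ [(s, p - 1)]) hlen').1]
        simp [trueCont]
      | true =>
        simp only [pvEnum, pvALoop]
        simp only [reduceCtorEq, and_false, if_false]
        norm_num
        by_cases hp : p = n
        · have hr : r = [] := by
            have : (r.length : Int) = 0 := by omega
            simpa using this
          subst hr
          simp [pvEnum, pvALoop, trueCont, hp]
        · simp only [if_neg hp]
          rw [(ih (p + 1) out hlen').2 s]
          simp [trueCont, hp]

-- ===== VERDICT (by name: the statement is the Claim_ definition above) =====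
theorem flags_to_intervals_spec : Claim_equal_flags_to_intervals := by
  intro flags _
  unfold Spec_flags_to_intervals flags_to_intervals flags_to_intervals_alt
  have := (main_inv (flags.length : Int) flags 1 [] (by omega)).1
  simpa using this
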